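-- pv_equiv track=rewrite | github.com/RistyTang/ActorCritic | REinforce.py | gen_all_config
-- ===== SOURCE A (Python) =====
-- def gen_all_config(num_apps, num_resources):
--     '''
--     generate all resource config according to the number of apps and total resources
--
--     Args:
--         num_apps (int): number of apps
--         num_resources (int): total units of resources
--
--     Returns:
--         list<list>: a list containing all possible config, which is list<int>
--     '''
--     if num_apps == 1:
--         # Only one app, it get all remaining resources
--         return [[num_resources]]
--
--     all_config = []
--     for i in range(num_resources + 1):
--         # Recursively allocate the remaining resources among the remaining app
--         for sub_allocation in gen_all_config(num_apps - 1, num_resources - i):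
--             all_config.append([i] + sub_allocation)
--     return all_config
-- ===== SOURCE B (Python) =====
-- def gen_all_config(num_apps, num_resources):
--     # Iterative breadth-first layering instead of recursion: grow partial
--     # allocations one app at a time, then give the last app the remainder.
--     prefixes = [([], num_resources)]
--     for _ in range(num_apps - 1):
--         if not prefixes:
--             break  # no partial allocation can be extended; result is []
--         prefixes = [(p + [i], rem - i)
--                     for (p, rem) in prefixes
--                     for i in range(rem + 1)]
--     return [p + [rem] for (p, rem) in prefixes]
-- ===== Notes on version B (the rewrite author's own statement) =====
-- stated objective: alternative
-- what changed: Replaces the top-down recursion (branching on num_apps==1 and recursing per first-app share) by an iterative breadth-first construction that grows partial allocations one app per round and assigns the remainder to the last app.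
-- outside the precondition, e.g. on gen_all_config(-1, -1): A returns [], B returns [[-1]]; on gen_all_config(0, -2): A returns [], B returns [[-2]]
import Mathlib
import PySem

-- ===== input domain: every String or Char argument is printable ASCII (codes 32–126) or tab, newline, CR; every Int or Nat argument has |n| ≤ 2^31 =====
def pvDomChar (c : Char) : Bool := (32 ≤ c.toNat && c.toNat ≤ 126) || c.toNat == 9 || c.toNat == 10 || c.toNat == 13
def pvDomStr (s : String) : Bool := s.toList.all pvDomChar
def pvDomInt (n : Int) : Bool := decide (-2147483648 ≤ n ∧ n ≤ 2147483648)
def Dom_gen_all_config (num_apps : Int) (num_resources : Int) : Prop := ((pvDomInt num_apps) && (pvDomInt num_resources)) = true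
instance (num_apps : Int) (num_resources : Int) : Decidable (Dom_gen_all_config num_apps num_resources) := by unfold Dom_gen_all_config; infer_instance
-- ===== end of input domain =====

-- B replaces A's recursion by an iterative breadth-first layering over partial allocations (alternative decomposition, same cost).

-- ===== PORT A =====
-- A recurses on num_apps; the recursion is carried by a Nat copy of num_apps
-- (faithful on Pre_, where num_apps ≥ 1; Python diverges for num_apps ≤ 0).
def genA : Nat → Int → List (List Int)
  | 0, _ => []
  | 1, nr => [[nr]]
  | (n+2), nr =>
      (PySem.List.pyRange 0 (nr + 1) 1).foldl
        (fun acc i => acc ++ (genA (n+1) (nr - i)).map (fun sub => i :: sub)) []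

def gen_all_config (num_apps : Int) (num_resources : Int) : List (List Int) :=
  genA num_apps.toNat num_resources

-- ===== PORT B =====
-- B's 'for _ in range(num_apps - 1): if not prefixes: break; prefixes = …'
-- as a counted recursion (the break is the isEmpty early exit).
def altLoop : Nat → List (List Int × Int) → List (List Int × Int)
  | 0, pres => pres
  | (k+1), pres =>
      if pres.isEmpty then pres
      else altLoop k
        (pres.flatMap (fun pr =>
          (PySem.List.pyRange 0 (pr.2 + 1) 1).map (fun i => (pr.1 ++ [i], pr.2 - i))))

def gen_all_config_alt (num_apps : Int) (num_resources : Int) : List (List Int) :=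
  let prefixes := altLoop (num_apps - 1).toNat [(([] : List Int), num_resources)]
  prefixes.map (fun pr => pr.1 ++ [pr.2])

-- ===== PRECONDITION & SPEC =====
-- Pre_ excludes the nonsensical num_apps ≤ 0 (outside the function's natural domain): there A recurses without a base case and raises RecursionError whenever num_resources ≥ 0, and when num_resources < 0 it happens to return [] where B returns [[num_resources]].
def Pre_gen_all_config (num_apps : Int) (num_resources : Int) : Prop := 1 ≤ num_apps
instance (num_apps : Int) (num_resources : Int) : Decidable (Pre_gen_all_config num_apps num_resources) := by unfold Pre_gen_all_config; infer_instance
def pvWitness_gen_all_config : Int × Int := (3, 4)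

def Spec_gen_all_config (num_apps : Int) (num_resources : Int) (out : List (List Int)) : Prop := out = gen_all_config_alt num_apps num_resources
instance (num_apps : Int) (num_resources : Int) (out : List (List Int)) : Decidable (Spec_gen_all_config num_apps num_resources out) := by unfold Spec_gen_all_config; infer_instance

-- ===== CLAIM (what is proved, stated in full; the proofs are below) =====
def Claim_equal_gen_all_config : Prop := ∀ (num_apps : Int) (num_resources : Int), Dom_gen_all_config num_apps num_resources → Pre_gen_all_config num_apps num_resources → Spec_gen_all_config num_apps num_resources (gen_all_config num_apps num_resources)

-- ===== LEMMAS AND PROOFS =====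

-- B's one layer of growth, named so the fold can be seen as an iterate
def pvStep (pres : List (List Int × Int)) : List (List Int × Int) :=
  pres.flatMap (fun pr =>
    (PySem.List.pyRange 0 (pr.2 + 1) 1).map (fun i => (pr.1 ++ [i], pr.2 - i)))

theorem altLoop_eq_iterate (k : Nat) (pres : List (List Int × Int)) :
    altLoop k pres = pvStep^[k] pres := by
  induction k generalizing pres with
  | zero => rfl
  | succ k ih =>
      unfold altLoop
      cases pres with
      | nil =>
          have h : pvStep^[k+1] ([] : List (List Int × Int)) = [] :=
            Function.iterate_fixed rfl (k+1)
          simp [h]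
      | cons p ps =>
          rw [if_neg (by simp), ih, Function.iterate_succ_apply]
          rfl

theorem alt_eq_iterate (na nr : Int) :
    gen_all_config_alt na nr =
      (pvStep^[(na - 1).toNat] [(([] : List Int), nr)]).map (fun pr => pr.1 ++ [pr.2]) := by
  unfold gen_all_config_alt
  rw [altLoop_eq_iterate]

theorem genA_succ_flatMap (n : Nat) (nr : Int) :
    genA (n+2) nr =
      (PySem.List.pyRange 0 (nr + 1) 1).flatMap
        (fun i => (genA (n+1) (nr - i)).map (fun sub => i :: sub)) := by
  simp only [genA]
  rw [PySem.List.foldl_append_eq_flatMap]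
  simp

theorem pvStep_iterate (k : Nat) (pres : List (List Int × Int)) :
    ((pvStep^[k] pres).map (fun pr => pr.1 ++ [pr.2])) =
      pres.flatMap (fun pr => (genA (k+1) pr.2).map (fun c => pr.1 ++ c)) := by
  induction k generalizing pres with
  | zero =>
      simp only [Function.iterate_zero, id_eq, genA]
      induction pres with
      | nil => rfl
      | cons p ps ihp => simp [List.flatMap_cons] at ihp ⊢; exact ihp
  | succ k ih =>
      rw [Function.iterate_succ_apply, ih]
      unfold pvStep
      rw [List.flatMap_assoc]
      apply List.flatMap_congr
      intro pr _
      rw [genA_succ_flatMap, List.map_flatMap, List.flatMap_map]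
      apply List.flatMap_congr
      intro i _
      simp [List.map_map, Function.comp_def]

-- ===== VERDICT (by name: the statement is the Claim_ definition above) =====
theorem gen_all_config_spec : Claim_equal_gen_all_config := by
  intro na nr _ hpre
  unfold Spec_gen_all_config gen_all_config
  rw [alt_eq_iterate, pvStep_iterate]
  have h1 : (na - 1).toNat + 1 = na.toNat := by
    have : 1 ≤ na := hpre
    omega
  simp [List.flatMap]
  congr 1
  have h2 : 1 ≤ na := hpre
  omega
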